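-- pv_equiv track=rewrite | github.com/asrvsn/matgeo | src/matgeo/utils/poly.py | traverse_face_edges
-- ===== SOURCE A (Python) =====
-- from typing import Generator, Tuple, List, Union
--
-- def traverse_face_edges(faces: list) -> Generator:
--     ''' Compute the incident face pairs '''
--     seen = set()
--     for i in range(len(faces)):
--         for j in range(len(faces)):
--             if i == j:
--                 continue
--             e = [i, j]
--             if not (frozenset(e) in seen):
--                 seen.add(frozenset(e))
--                 if len(set(faces[i]) & set(faces[j])) == 2: # Faces share an edge
--                     yield e
-- ===== SOURCE B (Python) =====
-- def traverse_face_edges(faces: list):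
--     ''' Compute the incident face pairs (vertex->faces index; count shared vertices per co-occurring pair) '''
--     vmap = {}
--     for i, f in enumerate(faces):
--         for v in dict.fromkeys(f):
--             vmap.setdefault(v, []).append(i)
--     for i, f in enumerate(faces):
--         cnt = {}
--         for v in dict.fromkeys(f):
--             for j in vmap[v]:
--                 if j > i:
--                     cnt[j] = cnt.get(j, 0) + 1
--         for j in sorted(j for j, c in cnt.items() if c == 2):
--             yield [i, j]
-- ===== Notes on version B (the rewrite author's own statement) =====
-- stated objective: faster
-- what changed: Replaces A's O(n^2) all-pairs scan (with a seen-set of frozensets and a set intersection per pair) by a vertex-to-faces index: for each face, shared-vertex counts with later faces are accumulated per co-occurring vertex and pairs with count exactly 2 are emitted in sorted order.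
import Mathlib
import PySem

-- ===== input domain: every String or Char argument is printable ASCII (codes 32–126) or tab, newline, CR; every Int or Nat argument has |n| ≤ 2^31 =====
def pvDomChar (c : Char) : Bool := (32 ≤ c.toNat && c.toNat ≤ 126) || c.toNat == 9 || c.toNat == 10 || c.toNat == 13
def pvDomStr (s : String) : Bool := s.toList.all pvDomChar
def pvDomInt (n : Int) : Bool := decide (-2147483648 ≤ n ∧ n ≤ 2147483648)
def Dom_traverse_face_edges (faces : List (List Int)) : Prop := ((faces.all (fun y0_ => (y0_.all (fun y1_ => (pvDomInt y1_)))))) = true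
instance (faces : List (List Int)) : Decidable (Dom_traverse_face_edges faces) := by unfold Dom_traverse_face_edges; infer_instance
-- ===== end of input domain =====

-- B replaces A's all-pairs set-intersection scan by a vertex→faces index with per-face
-- shared-vertex counting (objective: faster); both yield pairs [i, j], i < j, in lex order.

-- ===== PORT A =====
-- Port of A. 'seen' is a Python set of frozensets; ported by hand as a list of PySem.Set Int
-- with membership tested up to PySem.Set.equal (frozenset equality is set equality) — exact.
def traverse_face_edges (faces : List (List Int)) : List (List Int) :=
  ((PySem.List.pyRange 0 (PySem.List.len faces)).foldl (fun st i =>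
    (PySem.List.pyRange 0 (PySem.List.len faces)).foldl (fun st j =>
      if i == j then st
      else
        let e : List Int := [i, j]
        let fz : PySem.Set Int := PySem.Set.ofList e
        if !(st.1.any (fun s => PySem.Set.equal s fz)) then
          let seen := st.1 ++ [fz]
          if PySem.Set.len (PySem.Set.inter (PySem.Set.ofList (PySem.List.pyGetD faces i []))
               (PySem.Set.ofList (PySem.List.pyGetD faces j []))) == 2 then
            (seen, st.2 ++ [e])
          else (seen, st.2)
        else st) st)
    (([] : List (PySem.Set Int)), ([] : List (List Int)))).2

-- ===== PORT B =====
-- Port of B: vertex→faces index, per-row shared-vertex counts, filter == 2, sorted.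
-- 'vmap.setdefault(v, []).append(i)' is PySem.Dict.modify v [] (· ++ [i]) — exact.
-- B's vertex→faces index ('vmap' built by B's first loop)
def pvVmap (faces : List (List Int)) : PySem.Dict Int (List Int) :=
  (PySem.List.enumerate faces).foldl (fun d p =>
    (PySem.List.dedup p.2).foldl (fun d v => d.modify v [] (fun l => l ++ [p.1])) d)
    PySem.Dict.empty

def traverse_face_edges_alt (faces : List (List Int)) : List (List Int) :=
  let vmap : PySem.Dict Int (List Int) := pvVmap faces
  (PySem.List.enumerate faces).foldl (fun out p =>
    let cnt : PySem.Dict Int Int :=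
      (PySem.List.dedup p.2).foldl (fun d v =>
        (vmap.getD v []).foldl (fun d j => if p.1 < j then d.modify j 0 (· + 1) else d) d)
        PySem.Dict.empty
    (PySem.List.sorted ((cnt.items.filter (fun q => q.2 == 2)).map (·.1)) (fun j => j)).foldl
      (fun out j => out ++ [[p.1, j]]) out) []

-- ===== PRECONDITION & SPEC =====
def Spec_traverse_face_edges (faces : List (List Int)) (out : List (List Int)) : Prop := out = traverse_face_edges_alt faces
instance (faces : List (List Int)) (out : List (List Int)) : Decidable (Spec_traverse_face_edges faces out) := by unfold Spec_traverse_face_edges; infer_instance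

-- ===== CLAIM (what is proved, stated in full; the proofs are below) =====
def Claim_equal_traverse_face_edges : Prop := ∀ (faces : List (List Int)), Dom_traverse_face_edges faces → Spec_traverse_face_edges faces (traverse_face_edges faces)

-- ===== LEMMAS AND PROOFS =====
-- shared-vertex test of faces i and j, exactly as A computes it
def pvShared (faces : List (List Int)) (i j : Int) : Bool :=
  PySem.Set.len (PySem.Set.inter (PySem.Set.ofList (PySem.List.pyGetD faces i []))
    (PySem.Set.ofList (PySem.List.pyGetD faces j []))) == 2

-- the common normal form: pairs [i, j], i < j, sharing exactly two vertices, in lex order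
def pvSpec (faces : List (List Int)) (k : Int) : List (List Int) :=
  (PySem.List.pyRange k (PySem.List.len faces)).flatMap (fun i =>
    ((PySem.List.pyRange (i + 1) (PySem.List.len faces)).filter (fun j => pvShared faces i j)).map
      (fun j => [i, j]))

-- ---- A = spec ----
-- the body of A's inner loop, named for the proofs
def pvInner (faces : List (List Int)) (i : Int)
    (st : List (PySem.Set Int) × List (List Int)) (j : Int) :
    List (PySem.Set Int) × List (List Int) :=
  if i == j then st
  else
    let e : List Int := [i, j]
    let fz : PySem.Set Int := PySem.Set.ofList e
    if !(st.1.any (fun s => PySem.Set.equal s fz)) then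
      let seen := st.1 ++ [fz]
      if PySem.Set.len (PySem.Set.inter (PySem.Set.ofList (PySem.List.pyGetD faces i []))
           (PySem.Set.ofList (PySem.List.pyGetD faces j []))) == 2 then
        (seen, st.2 ++ [e])
      else (seen, st.2)
    else st

theorem pvA_eq_fold (faces : List (List Int)) : traverse_face_edges faces =
    ((PySem.List.pyRange 0 (PySem.List.len faces)).foldl
      (fun st i => (PySem.List.pyRange 0 (PySem.List.len faces)).foldl (pvInner faces i) st)
      ([], [])).2 := rfl

-- membership of the unordered pair {i, j} in A's 'seen'
def pvSeenP (seen : List (PySem.Set Int)) (i j : Int) : Prop :=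
  (seen.any (fun s => PySem.Set.equal s (PySem.Set.ofList [i, j]))) = true

theorem pvEqual_pair_iff (a b c d : Int) :
    PySem.Set.equal (PySem.Set.ofList [a, b]) (PySem.Set.ofList [c, d]) = true ↔
      (∀ x : Int, (x = a ∨ x = b) ↔ (x = c ∨ x = d)) := by
  rw [PySem.Set.equal_iff]
  constructor
  · intro h x; have := h x; simpa [PySem.Set.mem_ofList] using this
  · intro h x; simpa [PySem.Set.mem_ofList] using h x

theorem pvSeenP_append (seen : List (PySem.Set Int)) (s : PySem.Set Int) (i j : Int) :
    pvSeenP (seen ++ [s]) i j ↔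
      pvSeenP seen i j ∨ PySem.Set.equal s (PySem.Set.ofList [i, j]) = true := by
  simp [pvSeenP, List.any_append]

theorem pvInner_eval_fresh (faces : List (List Int)) (i k : Int)
    (seen : List (PySem.Set Int)) (out : List (List Int))
    (hik : i ≠ k) (hfresh : ¬ pvSeenP seen i k) :
    pvInner faces i (seen, out) k =
      (seen ++ [PySem.Set.ofList [i, k]],
       if pvShared faces i k then out ++ [[i, k]] else out) := by
  have hb : (seen.any (fun s => PySem.Set.equal s (PySem.Set.ofList [i, k]))) = false := by
    simpa [pvSeenP] using hfresh
  by_cases hs : pvShared faces i k <;>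
    simp [pvInner, pvShared, hik, hb] at hs ⊢ <;> simp [hs]

theorem pvInner_skip (faces : List (List Int)) (i k : Int)
    (seen : List (PySem.Set Int)) (out : List (List Int))
    (h : i = k ∨ pvSeenP seen i k) :
    pvInner faces i (seen, out) k = (seen, out) := by
  rcases h with h | h
  · simp [pvInner, h]
  · by_cases hik : i = k
    · simp [pvInner, hik]
    · have hb : (seen.any (fun s => PySem.Set.equal s (PySem.Set.ofList [i, k]))) = true := h
      simp [pvInner, hik, hb]

theorem pvSuffix (faces : List (List Int)) (i : Int) :
    ∀ (fuel : Nat) (k : Int) (seen : List (PySem.Set Int)) (out : List (List Int)),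
      i < k → (PySem.List.len faces - k).toNat ≤ fuel →
      (∀ b : Int, k ≤ b → b < PySem.List.len faces → ¬ pvSeenP seen i b) →
      (PySem.List.pyRange k (PySem.List.len faces)).foldl (pvInner faces i) (seen, out) =
        (seen ++ (PySem.List.pyRange k (PySem.List.len faces)).map
            (fun j => PySem.Set.ofList [i, j]),
         out ++ ((PySem.List.pyRange k (PySem.List.len faces)).filter
            (fun j => pvShared faces i j)).map (fun j => [i, j])) := by
  intro fuel
  induction fuel with
  | zero =>
    intro k seen out hik hfuel _
    have hNk : PySem.List.len faces ≤ k := by omega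
    rw [PySem.List.pyRange_one_eq_nil hNk]
    simp
  | succ m ih =>
    intro k seen out hik hfuel hfresh
    by_cases hkN : k < PySem.List.len faces
    · rw [PySem.List.pyRange_one_cons hkN, List.foldl_cons,
        pvInner_eval_fresh faces i k seen out (by omega) (hfresh k le_rfl hkN)]
      have hfresh' : ∀ b : Int, k + 1 ≤ b → b < PySem.List.len faces →
          ¬ pvSeenP (seen ++ [PySem.Set.ofList [i, k]]) i b := by
        intro b hb hbN hmem
        rcases (pvSeenP_append _ _ _ _).mp hmem with h | h
        · exact hfresh b (by omega) hbN h
        · have := (pvEqual_pair_iff i k i b).mp h b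
          omega
      rw [ih (k + 1) _ _ (by omega) (by omega) hfresh']
      rw [Prod.mk.injEq]
      refine ⟨by simp, ?_⟩
      rw [List.filter_cons]
      by_cases hs : pvShared faces i k <;> simp [hs]
    · have hNk : PySem.List.len faces ≤ k := by omega
      rw [PySem.List.pyRange_one_eq_nil hNk]
      simp

theorem pvFoldl_fixed {α β : Type} (f : β → α → β) (init : β) :
    ∀ l : List α, (∀ x ∈ l, f init x = init) → l.foldl f init = init := by
  intro l
  induction l with
  | nil => intro _; rfl
  | cons x t ih =>
    intro h
    rw [List.foldl_cons, h x (by simp)]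
    exact ih (fun y hy => h y (by simp [hy]))

-- the 'seen' set after the first i outer rounds: all pairs {a, j}, a < i, a < j < len
def pvSeenAfter (faces : List (List Int)) (i : Int) : List (PySem.Set Int) :=
  (PySem.List.pyRange 0 i).flatMap (fun a =>
    (PySem.List.pyRange (a + 1) (PySem.List.len faces)).map
      (fun j => PySem.Set.ofList [a, j]))

theorem pvMem_seenAfter (faces : List (List Int)) (i : Int) (s : PySem.Set Int) :
    s ∈ pvSeenAfter faces i ↔ ∃ a j : Int, 0 ≤ a ∧ a < i ∧ a + 1 ≤ j ∧
      j < PySem.List.len faces ∧ s = PySem.Set.ofList [a, j] := by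
  simp only [pvSeenAfter, List.mem_flatMap, List.mem_map, PySem.List.mem_pyRange_one]
  constructor
  · rintro ⟨a, ⟨ha0, hai⟩, j, ⟨hj1, hj2⟩, rfl⟩
    exact ⟨a, j, ha0, hai, hj1, hj2, rfl⟩
  · rintro ⟨a, j, ha0, hai, hj1, hj2, rfl⟩
    exact ⟨a, ⟨ha0, hai⟩, j, ⟨hj1, hj2⟩, rfl⟩

theorem pvSeenAfter_succ (faces : List (List Int)) (i : Int) (h : 0 ≤ i) :
    pvSeenAfter faces (i + 1) = pvSeenAfter faces i ++
      (PySem.List.pyRange (i + 1) (PySem.List.len faces)).map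
        (fun j => PySem.Set.ofList [i, j]) := by
  unfold pvSeenAfter
  rw [PySem.List.pyRange_one_succ_right h, List.flatMap_append]
  simp

theorem pvPrefix (faces : List (List Int)) (i : Int)
    (seen : List (PySem.Set Int)) (out : List (List Int))
    (hseen : ∀ j : Int, 0 ≤ j → j < i → pvSeenP seen i j) :
    (PySem.List.pyRange 0 (i + 1)).foldl (pvInner faces i) (seen, out) = (seen, out) := by
  apply pvFoldl_fixed
  intro x hx
  rw [PySem.List.mem_pyRange_one] at hx
  by_cases hxi : i = x
  · exact pvInner_skip _ _ _ _ _ (Or.inl hxi)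
  · exact pvInner_skip _ _ _ _ _ (Or.inr (hseen x hx.1 (by omega)))

theorem pvRow (faces : List (List Int)) (i : Int) (out : List (List Int))
    (hi0 : 0 ≤ i) (hiN : i < PySem.List.len faces) :
    (PySem.List.pyRange 0 (PySem.List.len faces)).foldl (pvInner faces i)
        (pvSeenAfter faces i, out) =
      (pvSeenAfter faces (i + 1),
       out ++ ((PySem.List.pyRange (i + 1) (PySem.List.len faces)).filter
          (fun j => pvShared faces i j)).map (fun j => [i, j])) := by
  rw [PySem.List.pyRange_one_append 0 (i + 1) (PySem.List.len faces) (by omega) (by omega),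
    List.foldl_append]
  rw [pvPrefix faces i _ out ?hseen]
  · rw [pvSuffix faces i (PySem.List.len faces - (i + 1)).toNat (i + 1) _ _ (by omega) le_rfl
      ?hfresh]
    · rw [pvSeenAfter_succ faces i hi0]
    case hfresh =>
      intro b hb hbN hmem
      obtain ⟨s, hs, heq⟩ := List.any_eq_true.mp hmem
      obtain ⟨a, j, ha0, hai, hj1, hj2, rfl⟩ := (pvMem_seenAfter faces i s).mp hs
      have h1 := ((pvEqual_pair_iff a j i b).mp heq i).mpr (Or.inl rfl)
      have h2 := ((pvEqual_pair_iff a j i b).mp heq b).mpr (Or.inr rfl)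
      omega
  case hseen =>
    intro j hj0 hji
    refine List.any_eq_true.mpr ⟨PySem.Set.ofList [j, i], ?_, ?_⟩
    · exact (pvMem_seenAfter faces i _).mpr ⟨j, i, hj0, hji, by omega, hiN, rfl⟩
    · rw [pvEqual_pair_iff]
      intro x; tauto

theorem pvOuter (faces : List (List Int)) :
    ∀ (fuel : Nat) (i : Int) (out : List (List Int)),
      0 ≤ i → i ≤ PySem.List.len faces → (PySem.List.len faces - i).toNat ≤ fuel →
      (PySem.List.pyRange i (PySem.List.len faces)).foldl
          (fun st a => (PySem.List.pyRange 0 (PySem.List.len faces)).foldl (pvInner faces a) st)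
          (pvSeenAfter faces i, out) =
        (pvSeenAfter faces (PySem.List.len faces), out ++ pvSpec faces i) := by
  intro fuel
  induction fuel with
  | zero =>
    intro i out hi0 hiN hfuel
    have hNi : i = PySem.List.len faces := by omega
    subst hNi
    rw [PySem.List.pyRange_one_eq_nil le_rfl]
    simp [pvSpec, PySem.List.pyRange_one_eq_nil le_rfl]
  | succ m ih =>
    intro i out hi0 hiN hfuel
    by_cases hiltN : i < PySem.List.len faces
    · rw [PySem.List.pyRange_one_cons hiltN, List.foldl_cons, pvRow faces i out hi0 hiltN,
        ih (i + 1) _ (by omega) (by omega) (by omega)]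
      rw [Prod.mk.injEq]
      refine ⟨rfl, ?_⟩
      conv_rhs => rw [pvSpec, PySem.List.pyRange_one_cons hiltN, List.flatMap_cons]
      rw [List.append_assoc]
      rfl
    · have hNi : i = PySem.List.len faces := by omega
      subst hNi
      rw [PySem.List.pyRange_one_eq_nil le_rfl]
      simp [pvSpec, PySem.List.pyRange_one_eq_nil le_rfl]

theorem pvA_eq_spec (faces : List (List Int)) :
    traverse_face_edges faces = pvSpec faces 0 := by
  rw [pvA_eq_fold]
  have h0 : pvSeenAfter faces 0 = [] := by
    simp [pvSeenAfter, PySem.List.pyRange_one_eq_nil le_rfl]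
  have hN : (0 : Int) ≤ PySem.List.len faces := by
    rw [PySem.List.len_eq]; exact Int.natCast_nonneg _
  have := pvOuter faces (PySem.List.len faces).toNat 0 [] le_rfl hN (by omega)
  rw [h0] at this
  rw [this]
  simp

-- ---- B = spec ----
-- B-side proof helpers
-- the faces incident to vertex v, in ascending order (value of B's vertex→faces index)
def pvOcc (faces : List (List Int)) (v : Int) : List Int :=
  (PySem.List.pyRange 0 (PySem.List.len faces)).filter
    (fun a => decide (v ∈ PySem.List.pyGetD faces a []))

-- list counted by B's per-row dict: one entry j per vertex shared between face i and face j > i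
def pvLi (faces : List (List Int)) (i : Int) : List Int :=
  (PySem.List.dedup (PySem.List.pyGetD faces i [])).flatMap
    (fun v => (pvOcc faces v).filter (fun b => decide (i < b)))

theorem pvFilter_beq_of_nodup (v : Int) : ∀ (l : List Int), l.Nodup →
    l.filter (fun w => w == v) = if v ∈ l then [v] else [] := by
  intro l
  induction l with
  | nil => simp
  | cons a t ih =>
    intro h
    rw [List.filter_cons]
    by_cases hav : a = v
    · subst hav
      have hnm : a ∉ t := (List.nodup_cons.mp h).1
      simp [hnm]
      intro w hw hwa
      subst hwa; exact hnm hw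
    · rw [ih (List.nodup_cons.mp h).2]
      simp [hav, Ne.symm hav]

theorem pvIndex_pointwise (faces : List (List Int)) (v : Int) :
    ∀ l : List Int,
      ((l.flatMap (fun a => (PySem.List.dedup (PySem.List.pyGetD faces a [])).map
          (fun w => (w, a)))).filter (fun q => q.1 == v)).map (·.2)
        = l.filter (fun a => decide (v ∈ PySem.List.pyGetD faces a [])) := by
  intro l
  induction l with
  | nil => rfl
  | cons a t ih =>
    rw [List.flatMap_cons, List.filter_append, List.map_append, ih, List.filter_cons,
      List.filter_map]
    have hcomp : ((fun q : Int × Int => q.1 == v) ∘ (fun w => (w, a))) = fun w => w == v := rfl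
    rw [hcomp, pvFilter_beq_of_nodup v _ (PySem.List.nodup_dedup _)]
    by_cases hv : v ∈ PySem.List.pyGetD faces a [] <;>
      simp [hv]

theorem pvVmap_getD (faces : List (List Int)) (v : Int) :
    (pvVmap faces).getD v [] = pvOcc faces v := by
  unfold pvVmap
  rw [PySem.List.enumerate_eq_map_pyRange faces [], List.foldl_map]
  have hswap : ∀ (a : Int) (d : PySem.Dict Int (List Int)),
      (PySem.List.dedup (PySem.List.pyGetD faces a [])).foldl
          (fun d w => d.modify w [] (fun l => l ++ [a])) d
        = ((PySem.List.dedup (PySem.List.pyGetD faces a [])).map (fun w => (w, a))).foldl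
          (fun d q => d.modify q.1 [] (fun l => l ++ [q.2])) d := by
    intro a d
    rw [List.foldl_map]
  simp only [hswap]
  rw [← List.foldl_flatMap, PySem.Dict.getD_foldl_modify_append, PySem.Dict.getD_empty,
    List.nil_append, pvIndex_pointwise]
  rfl

theorem pvCount_flatMap (g : Int → List Int) (p : Int → Bool) (j : Int) :
    ∀ l : List Int, (∀ v ∈ l, ((g v).count j) = if p v then 1 else 0) →
      ((l.flatMap g).count j) = l.countP p := by
  intro l
  induction l with
  | nil => intro _; rfl
  | cons a t ih =>
    intro h
    rw [List.flatMap_cons, List.count_append, h a (by simp), List.countP_cons,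
      ih (fun v hv => h v (by simp [hv]))]
    exact Nat.add_comm _ _



theorem pvOcc_filter_count (faces : List (List Int)) (v i j : Int)
    (hi0 : 0 ≤ i) (hij : i < j) (hjN : j < PySem.List.len faces) :
    (((pvOcc faces v).filter (fun b => decide (i < b))).count j)
      = if decide (v ∈ PySem.List.pyGetD faces j []) then 1 else 0 := by
  have hnd : ((pvOcc faces v).filter (fun b => decide (i < b))).Nodup :=
    ((PySem.List.nodup_pyRange_one _ _).filter _).filter _
  rw [List.Nodup.count hnd]
  rw [PySem.List.len_eq] at hjN
  by_cases hv : v ∈ PySem.List.pyGetD faces j [] <;>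
    simp [pvOcc, List.mem_filter, PySem.List.mem_pyRange_one, PySem.List.len_eq, hv, hij, hjN]
  omega

theorem pvLi_count (faces : List (List Int)) (i j : Int)
    (hi0 : 0 ≤ i) (hij : i < j) (hjN : j < PySem.List.len faces) :
    ((pvLi faces i).count j)
      = ((PySem.Set.ofList (PySem.List.pyGetD faces i [])).filter
          (fun w => (PySem.Set.ofList (PySem.List.pyGetD faces j [])).contains w)).length := by
  unfold pvLi
  rw [pvCount_flatMap _ (fun v => decide (v ∈ PySem.List.pyGetD faces j [])) j _
    (fun v _ => pvOcc_filter_count faces v i j hi0 hij hjN)]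
  rw [PySem.List.dedup_eq_ofList, List.countP_eq_length_filter]
  congr 1
  apply List.filter_congr
  intro w _
  rw [PySem.Set.contains_eq_decide]
  simp [PySem.Set.mem_ofList]

theorem pvShared_iff_count (faces : List (List Int)) (i j : Int)
    (hi0 : 0 ≤ i) (hij : i < j) (hjN : j < PySem.List.len faces) :
    pvShared faces i j = true ↔ ((pvLi faces i).count j) = 2 := by
  rw [pvShared, pvLi_count faces i j hi0 hij hjN]
  unfold PySem.Set.inter
  rw [PySem.Set.len_eq]
  simp [beq_iff_eq]
  omega

theorem pvMem_Li (faces : List (List Int)) (i j : Int) :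
    j ∈ pvLi faces i ↔ (i < j ∧ j < PySem.List.len faces ∧ 0 ≤ j ∧
      ∃ v, v ∈ PySem.List.pyGetD faces i [] ∧ v ∈ PySem.List.pyGetD faces j []) := by
  simp only [pvLi, List.mem_flatMap, List.mem_filter, pvOcc, PySem.List.mem_dedup,
    PySem.List.mem_pyRange_one, decide_eq_true_eq]
  constructor
  · rintro ⟨v, hvi, ⟨⟨hj0, hjN⟩, hvj⟩, hij⟩
    exact ⟨hij, hjN, hj0, v, hvi, hvj⟩
  · rintro ⟨hij, hjN, hj0, v, hvi, hvj⟩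
    exact ⟨v, hvi, ⟨⟨hj0, hjN⟩, hvj⟩, hij⟩

-- B's per-row counter dict, in flattened form
def pvCnt (faces : List (List Int)) (i : Int) : PySem.Dict Int Int :=
  (pvLi faces i).foldl (fun d j => d.modify j 0 (· + 1)) PySem.Dict.empty

theorem pvCnt_eq (faces : List (List Int)) (i : Int) :
    (PySem.List.dedup (PySem.List.pyGetD faces i [])).foldl (fun d v =>
        ((pvVmap faces).getD v []).foldl
          (fun d j => if i < j then d.modify j 0 (· + 1) else d) d)
        PySem.Dict.empty
      = pvCnt faces i := by
  have h1 : ∀ (v : Int) (d : PySem.Dict Int Int),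
      ((pvVmap faces).getD v []).foldl (fun d j => if i < j then d.modify j 0 (· + 1) else d) d
        = ((pvOcc faces v).filter (fun b => decide (i < b))).foldl
            (fun d j => d.modify j 0 (· + 1)) d := by
    intro v d
    rw [pvVmap_getD, PySem.List.foldl_ite_eq_foldl_filter]
  simp only [h1]
  rw [← List.foldl_flatMap]
  rfl

theorem pvCnt_getD (faces : List (List Int)) (i v : Int) :
    (pvCnt faces i).getD v 0 = ((pvLi faces i).count v : Int) := by
  unfold pvCnt
  rw [PySem.Dict.getD_foldl_modify_add_one, PySem.Dict.getD_empty, zero_add]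

theorem pvCnt_keys (faces : List (List Int)) (i : Int) :
    (pvCnt faces i).keys = PySem.Set.ofList (pvLi faces i) := by
  unfold pvCnt
  rw [PySem.Dict.keys_foldl_modify _ _ (fun _ _ => (· + 1)), PySem.Dict.keys_empty,
    PySem.Set.update_nil_left]

theorem pvFilteredKeys (faces : List (List Int)) (i : Int) :
    (((pvCnt faces i).items.filter (fun q => q.2 == 2)).map (·.1))
      = (PySem.Set.ofList (pvLi faces i)).filter
          (fun j => (((pvLi faces i).count j : Int)) == 2) := by
  rw [PySem.Dict.items_eq_map_keys _ (by
    rw [pvCnt_keys]; exact PySem.Set.nodup_ofList _) 0]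
  rw [List.filter_map, List.map_map]
  simp only [Function.comp_def, pvCnt_getD, pvCnt_keys, List.map_id_fun', id]

theorem pvRowB (faces : List (List Int)) (i : Int) (hi0 : 0 ≤ i) :
    PySem.List.sorted (((pvCnt faces i).items.filter (fun q => q.2 == 2)).map (·.1))
        (fun j => j)
      = (PySem.List.pyRange (i + 1) (PySem.List.len faces)).filter
          (fun j => pvShared faces i j) := by
  refine PySem.List.sorted_eq_of_perm_of_pairwise_lt _ _ _ ?_
    ((PySem.List.pairwise_lt_pyRange_one _ _).filter _)
  · rw [pvFilteredKeys]
    rw [List.perm_ext_iff_of_nodup ((PySem.List.nodup_pyRange_one _ _).filter _)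
        ((PySem.Set.nodup_ofList _).filter _)]
    intro j
    rw [List.mem_filter, List.mem_filter, PySem.List.mem_pyRange_one, PySem.Set.mem_ofList]
    constructor
    · rintro ⟨⟨hj1, hjN⟩, hsh⟩
      have hcount := (pvShared_iff_count faces i j hi0 (by omega) hjN).mp hsh
      refine ⟨List.count_pos_iff.mp (by omega), ?_⟩
      simp [hcount]
    · rintro ⟨hmem, hcnt⟩
      obtain ⟨hij, hjN, hj0, -⟩ := (pvMem_Li faces i j).mp hmem
      have hcnt' : (pvLi faces i).count j = 2 := by
        have := beq_iff_eq.mp hcnt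
        exact_mod_cast this
      exact ⟨⟨by omega, hjN⟩, (pvShared_iff_count faces i j hi0 hij hjN).mpr hcnt'⟩

theorem pvB_eq_fold (faces : List (List Int)) : traverse_face_edges_alt faces =
    (PySem.List.enumerate faces).foldl (fun out p =>
      (PySem.List.sorted ((((PySem.List.dedup p.2).foldl (fun d v =>
          ((pvVmap faces).getD v []).foldl
            (fun d j => if p.1 < j then d.modify j 0 (· + 1) else d) d)
          (PySem.Dict.empty : PySem.Dict Int Int)).items.filter
            (fun q => q.2 == 2)).map (·.1)) (fun j => j)).foldl
        (fun out j => out ++ [[p.1, j]]) out) [] := by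
  simp only [traverse_face_edges_alt]

theorem pvB_eq_spec (faces : List (List Int)) :
    traverse_face_edges_alt faces = pvSpec faces 0 := by
  rw [pvB_eq_fold, PySem.List.enumerate_eq_map_pyRange faces [], List.foldl_map]
  dsimp only
  refine (PySem.List.foldl_congr_mem _ _ (fun (out : List (List Int)) (a : Int) =>
    out ++ ((PySem.List.pyRange (a + 1) (PySem.List.len faces)).filter
      (fun j => pvShared faces a j)).map (fun j => [a, j])) _ ?_).trans ?_
  · intro acc x hx
    rw [PySem.List.mem_pyRange_one] at hx
    dsimp only
    simp only [pvCnt_eq faces x]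
    rw [pvRowB faces x hx.1, PySem.List.foldl_append_singleton_eq_map]
  · rw [PySem.List.foldl_append_eq_flatMap, List.nil_append]
    rfl

-- ===== VERDICT (by name: the statement is the Claim_ definition above) =====
theorem traverse_face_edges_spec : Claim_equal_traverse_face_edges := by
  intro faces _
  unfold Spec_traverse_face_edges
  rw [pvA_eq_spec, pvB_eq_spec]
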